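-- pv_equiv track=rewrite | github.com/ESMValGroup/ESMValTool | esmvaltool/diag_scripts/weathertyping/weathertyping_diagnostic_lwt.py | get_mapping_dict
-- ===== SOURCE A (Python) =====
-- def turn_set_to_mapping_dict(list_: list) -> dict:
--     result_dict = {}
--
--     for i, s in enumerate(list_):
--         for elem in s:
--             if elem not in result_dict:
--                 result_dict[elem] = i + 1
--             else:
--                 result_dict[elem].append(i)
--
--     return result_dict
--
-- def get_mapping_dict(selected_pairs: list) -> dict:
--     mapping_array = []
--
--     for i, elem in enumerate(selected_pairs):
--         mapping_array.append(elem[0])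
--
--     s = [set(i) for i in mapping_array if i]
--
--     def find_intersection(m_list: list) -> list:
--         for i, v in enumerate(m_list):
--             for j, k in enumerate(m_list[i + 1:], i + 1):
--                 if v & k:
--                     s[i] = v.union(m_list.pop(j))
--                     return find_intersection(m_list)
--         return m_list
--
--     merged_tuples = find_intersection(s)
--     mapping_dict = turn_set_to_mapping_dict(merged_tuples)
--
--     return mapping_dict
-- ===== SOURCE B (Python) =====
-- def _absorb(elems, label, index, result, cand):
--     # add the unseen elements of one set to the component, record their label,
--     # and extend the candidate pool with every set index sharing an element
--     for x in elems:
--         if x not in result: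
--             result[x] = label
--             cand.update(index[x])
--
--
-- def get_mapping_dict(selected_pairs: list) -> dict:
--     # Inverted-index closure (a different algorithm): instead of rescanning all pairs of sets,
--     # keep elem -> [set indices] and grow each component by absorbing the
--     # lowest-index not-yet-absorbed candidate set that shares an element.
--     sets = []
--     for pair in selected_pairs:
--         first = pair[0]
--         if first:
--             sets.append(list(dict.fromkeys(first)))
--     index = {}
--     for j, s in enumerate(sets):
--         for x in s:
--             index.setdefault(x, []).append(j)
--     absorbed = [False] * len(sets)
--     result = {}
--     label = 0
--     for i in range(len(sets)):
--         if absorbed[i]: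
--             continue
--         label += 1
--         absorbed[i] = True
--         cand = set()
--         _absorb(sets[i], label, index, result, cand)
--         while True:
--             avail = [j for j in cand if not absorbed[j]]
--             if not avail:
--                 break
--             j = min(avail)
--             absorbed[j] = True
--             _absorb(sets[j], label, index, result, cand)
--     return result
-- ===== Notes on version B (the rewrite author's own statement) =====
-- stated objective: alternative
-- what changed: B replaces A's restart-from-scratch scan over all pairs of sets (re-run after every single merge) by an inverted element->set-indices index and a per-component closure that repeatedly absorbs the minimal unabsorbed candidate set index, labelling elements as they join their component.
import Mathlib
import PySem

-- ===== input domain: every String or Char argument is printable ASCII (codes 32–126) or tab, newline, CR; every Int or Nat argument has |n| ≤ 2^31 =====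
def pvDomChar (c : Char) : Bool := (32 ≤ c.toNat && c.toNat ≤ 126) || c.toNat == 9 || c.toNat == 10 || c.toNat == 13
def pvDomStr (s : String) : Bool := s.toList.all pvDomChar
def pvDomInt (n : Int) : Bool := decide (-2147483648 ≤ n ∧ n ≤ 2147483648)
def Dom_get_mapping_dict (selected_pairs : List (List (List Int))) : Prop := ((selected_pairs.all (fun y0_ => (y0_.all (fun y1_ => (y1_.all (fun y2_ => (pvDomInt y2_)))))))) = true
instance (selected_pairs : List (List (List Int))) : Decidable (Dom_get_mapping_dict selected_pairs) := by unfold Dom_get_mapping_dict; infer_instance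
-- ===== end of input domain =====

-- ===== PORT A =====
-- B merges overlapping sets with an inverted elem->set-index map and per-component closure,
-- instead of A's restart-and-rescan over all pairs of sets (objective: alternative algorithm).

-- `if v & k:` — truthiness of the intersection of two sets
def pvInterB (v k : PySem.Set Int) : Bool := !(PySem.Set.inter v k).isEmpty

-- inner loop `for j, k in enumerate(m_list[i+1:], i+1): if v & k: ...` for one fixed v:
-- first k intersecting v, merged into v, with the rest of the list after removal of k
def pvAbsorbFirst (v : PySem.Set Int) : List (PySem.Set Int) →
    Option (PySem.Set Int × List (PySem.Set Int))
  | [] => none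
  | k :: ks =>
    if pvInterB v k then some (PySem.Set.union v k, ks)
    else
      match pvAbsorbFirst v ks with
      | some (u, ks') => some (u, k :: ks')
      | none => none

-- the double loop of find_intersection: first pair (i, j) in scan order with s[i] & s[j],
-- returning the list after `s[i] = v.union(m_list.pop(j))`; none = no intersecting pair
def pvMergeStep : List (PySem.Set Int) → Option (List (PySem.Set Int))
  | [] => none
  | v :: rest =>
    match pvAbsorbFirst v rest with
    | some (u, rest') => some (u :: rest')
    | none =>
      match pvMergeStep rest with
      | some rest' => some (v :: rest')
      | none => none

-- termination helper for pvFindIntersection (the merge removes one set)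
theorem pvAbsorbFirst_length (v : PySem.Set Int) (l : List (PySem.Set Int))
    (u : PySem.Set Int) (l' : List (PySem.Set Int)) (h : pvAbsorbFirst v l = some (u, l')) :
    l'.length + 1 = l.length := by
  induction l generalizing u l' with
  | nil => simp [pvAbsorbFirst] at h
  | cons k ks ih =>
    simp only [pvAbsorbFirst] at h
    split at h
    · simp_all
    · cases hrec : pvAbsorbFirst v ks with
      | none => rw [hrec] at h; simp at h
      | some p =>
        rw [hrec] at h
        cases p with
        | mk u0 ks' =>
          simp only [Option.some.injEq, Prod.mk.injEq] at h
          obtain ⟨rfl, rfl⟩ := h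
          have := ih u0 ks' hrec
          simp [← this]

theorem pvMergeStep_length (l l' : List (PySem.Set Int)) (h : pvMergeStep l = some l') :
    l'.length + 1 = l.length := by
  induction l generalizing l' with
  | nil => simp [pvMergeStep] at h
  | cons v rest ih =>
    simp only [pvMergeStep] at h
    cases habs : pvAbsorbFirst v rest with
    | some p =>
      rw [habs] at h
      cases p with
      | mk u rest' =>
        simp only [Option.some.injEq] at h
        subst h
        have := pvAbsorbFirst_length v rest u rest' habs
        simp [← this]
    | none =>
      rw [habs] at h
      cases hrec : pvMergeStep rest with
      | none => rw [hrec] at h; simp at h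
      | some rest' =>
        rw [hrec] at h
        simp only [Option.some.injEq] at h
        subst h
        have := ih rest' hrec
        simp [← this]

-- find_intersection: merge the first intersecting pair and recurse, else return the list
def pvFindIntersection (l : List (PySem.Set Int)) : List (PySem.Set Int) :=
  match h : pvMergeStep l with
  | some l' => pvFindIntersection l'
  | none => l
  termination_by l.length
  decreasing_by have := pvMergeStep_length l l' h; omega

-- turn_set_to_mapping_dict
def pvTurnSetToMappingDict (list_ : List (PySem.Set Int)) : PySem.Dict Int Int :=
  (PySem.List.enumerate list_).foldl (fun rd p =>
    p.2.foldl (fun rd elem =>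
      if !(rd.contains elem) then rd.insert elem (p.1 + 1)
      else rd  -- Python does result_dict[elem].append(i) here, an AttributeError on an int;
               -- unreachable: the merged sets are pairwise disjoint and duplicate-free
      ) rd) PySem.Dict.empty

def get_mapping_dict (selected_pairs : List (List (List Int))) : List (Int × Int) :=
  -- elem[0]: IndexError on an empty elem — excluded by Pre_get_mapping_dict (the .getD [] is never used there)
  let mapping_array := selected_pairs.map (fun elem => (PySem.List.pyGet? elem 0).getD [])
  let s := (mapping_array.filter (fun i => !i.isEmpty)).map (fun i => PySem.Set.ofList i)
  let merged_tuples := pvFindIntersection s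
  (pvTurnSetToMappingDict merged_tuples).items

-- ===== PORT B =====
-- sets = deduped non-empty first members, in order
def pvBuildSets (selected_pairs : List (List (List Int))) : List (List Int) :=
  selected_pairs.foldl (fun acc pair =>
    let first := (PySem.List.pyGet? pair 0).getD []  -- pair[0]; Pre_ excludes the empty pair
    if !first.isEmpty then acc ++ [PySem.List.dedup first] else acc) []

-- index: elem -> list of set indices containing it (setdefault(x, []).append(j))
def pvBuildIndex (sets : List (List Int)) : PySem.Dict Int (List Nat) :=
  sets.zipIdx.foldl (fun d p =>
    p.1.foldl (fun d x => d.modify x [] (fun l => l ++ [p.2])) d) PySem.Dict.empty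

-- _absorb: state is (result, cand)
def pvAbsorbElems (label : Int) (index : PySem.Dict Int (List Nat)) (elems : List Int)
    (st : PySem.Dict Int Int × PySem.Set Nat) : PySem.Dict Int Int × PySem.Set Nat :=
  elems.foldl (fun rc x =>
    if !(rc.1.contains x) then (rc.1.insert x label, PySem.Set.update rc.2 (index.getD x []))
    else rc) st

-- avail = [j for j in cand if not absorbed[j]]
def pvAvail (cand : PySem.Set Nat) (absorbed : List Bool) : List Nat :=
  cand.filter (fun j => !(absorbed.getD j true))

-- the `while True` closure loop; fuel = len(sets) bounds it (each pass absorbs a new index)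
def pvCloseLoop (sets : List (List Int)) (index : PySem.Dict Int (List Nat)) (label : Int) :
    Nat → List Bool → PySem.Dict Int Int → PySem.Set Nat → List Bool × PySem.Dict Int Int
  | 0, absorbed, result, _ => (absorbed, result)
  | fuel + 1, absorbed, result, cand =>
    match PySem.List.min? (pvAvail cand absorbed) (fun j => j) with
    | none => (absorbed, result)
    | some j =>
      let absorbed' := absorbed.set j true
      let st := pvAbsorbElems label index (sets.getD j []) (result, cand)
      pvCloseLoop sets index label fuel absorbed' st.1 st.2

-- one iteration of the outer `for i in range(len(sets))` loop (state: absorbed, result, label)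
def pvOuterStep (sets : List (List Int)) (index : PySem.Dict Int (List Nat))
    (st : List Bool × PySem.Dict Int Int × Int) (i : Nat) : List Bool × PySem.Dict Int Int × Int :=
  if st.1.getD i true then st
  else
    let label := st.2.2 + 1
    let absorbed1 := st.1.set i true
    let st1 := pvAbsorbElems label index (sets.getD i []) (st.2.1, PySem.Set.empty)
    let res := pvCloseLoop sets index label sets.length absorbed1 st1.1 st1.2
    (res.1, res.2, label)

def get_mapping_dict_alt (selected_pairs : List (List (List Int))) : List (Int × Int) :=
  let sets := pvBuildSets selected_pairs
  let index := pvBuildIndex sets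
  let final := (List.range sets.length).foldl (pvOuterStep sets index)
    (List.replicate sets.length false, PySem.Dict.empty, 0)
  final.2.1.items

-- ===== PRECONDITION & SPEC =====
-- Pre_ excludes exactly the inputs where A raises: an empty inner element makes elem[0] an IndexError.
def Pre_get_mapping_dict (selected_pairs : List (List (List Int))) : Prop :=
  ∀ elem ∈ selected_pairs, elem ≠ []
instance (selected_pairs : List (List (List Int))) : Decidable (Pre_get_mapping_dict selected_pairs) := by
  unfold Pre_get_mapping_dict; infer_instance

def pvWitness_get_mapping_dict : List (List (List Int)) :=
  [[[1, 2], [9]], [[3]], [[2, 5]], [[7, 3]]]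

def Spec_get_mapping_dict (selected_pairs : List (List (List Int))) (out : List (Int × Int)) : Prop := out = get_mapping_dict_alt selected_pairs
instance (selected_pairs : List (List (List Int))) (out : List (Int × Int)) : Decidable (Spec_get_mapping_dict selected_pairs out) := by unfold Spec_get_mapping_dict; infer_instance

-- ===== CLAIM (what is proved, stated in full; the proofs are below) =====
def Claim_equal_get_mapping_dict : Prop := ∀ (selected_pairs : List (List (List Int))), Dom_get_mapping_dict selected_pairs → Pre_get_mapping_dict selected_pairs → Spec_get_mapping_dict selected_pairs (get_mapping_dict selected_pairs)

-- ===== LEMMAS AND PROOFS =====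

-- ---- basic facts about the intersection test ----
theorem pvInterB_false_iff (v k : PySem.Set Int) :
    pvInterB v k = false ↔ ∀ x ∈ v, x ∉ k := by
  simp [pvInterB, List.isEmpty_iff, List.eq_nil_iff_forall_not_mem, PySem.Set.mem_inter]

theorem pvInterB_true_iff (v k : PySem.Set Int) :
    pvInterB v k = true ↔ ∃ x ∈ v, x ∈ k := by
  rw [← not_iff_not]
  push_neg
  simp only [Bool.not_eq_true]
  exact pvInterB_false_iff v k

-- ---- pvAbsorbFirst / pvMergeStep structure ----
theorem pvAbsorbFirst_none_iff (v : PySem.Set Int) (l : List (PySem.Set Int)) :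
    pvAbsorbFirst v l = none ↔ ∀ k ∈ l, pvInterB v k = false := by
  induction l with
  | nil => simp [pvAbsorbFirst]
  | cons k ks ih =>
    constructor
    · intro h k' hk'
      have hI : pvInterB v k = false := by
        by_contra hc
        rw [Bool.not_eq_false] at hc
        simp [pvAbsorbFirst, hc] at h
      rcases List.mem_cons.mp hk' with rfl | hk'
      · exact hI
      · have hnone : pvAbsorbFirst v ks = none := by
          cases hrec : pvAbsorbFirst v ks with
          | none => rfl
          | some p => cases p; simp [pvAbsorbFirst, hI, hrec] at h
        exact ih.mp hnone k' hk'
    · intro hall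
      have hI : pvInterB v k = false := hall k (by simp)
      have hnone : pvAbsorbFirst v ks = none := ih.mpr (fun k' hk' => hall k' (by simp [hk']))
      simp [pvAbsorbFirst, hI, hnone]

theorem pvAbsorbFirst_some_elems (v : PySem.Set Int) (l : List (PySem.Set Int))
    (u : PySem.Set Int) (l' : List (PySem.Set Int)) (h : pvAbsorbFirst v l = some (u, l')) :
    (∀ x ∈ u, x ∈ v ∨ ∃ k ∈ l, x ∈ k) ∧ (∀ k' ∈ l', k' ∈ l) := by
  induction l generalizing u l' with
  | nil => simp [pvAbsorbFirst] at h
  | cons k ks ih =>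
    simp only [pvAbsorbFirst] at h
    split at h
    · obtain ⟨rfl, rfl⟩ := by simpa using h
      constructor
      · intro x hx
        rcases (PySem.Set.mem_union v k x).mp hx with hv | hk
        · exact Or.inl hv
        · exact Or.inr ⟨k, by simp, hk⟩
      · intro k' hk'; simp [hk']
    · cases hrec : pvAbsorbFirst v ks with
      | none => rw [hrec] at h; simp at h
      | some p =>
        rw [hrec] at h
        cases p with
        | mk u0 ks' =>
          obtain ⟨rfl, rfl⟩ := by simpa using h
          obtain ⟨h1, h2⟩ := ih u0 ks' hrec
          constructor
          · intro x hx
            rcases h1 x hx with hv | ⟨k0, hk0, hxk0⟩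
            · exact Or.inl hv
            · exact Or.inr ⟨k0, by simp [hk0], hxk0⟩
          · intro k' hk'
            rcases List.mem_cons.mp hk' with rfl | hk'
            · simp
            · simp [h2 k' hk']

theorem pvMergeStep_elems (l l' : List (PySem.Set Int)) (h : pvMergeStep l = some l') :
    ∀ k' ∈ l', ∀ x ∈ k', ∃ k ∈ l, x ∈ k := by
  induction l generalizing l' with
  | nil => simp [pvMergeStep] at h
  | cons v rest ih =>
    simp only [pvMergeStep] at h
    cases habs : pvAbsorbFirst v rest with
    | some p =>
      rw [habs] at h
      cases p with
      | mk u rest' =>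
        simp only [Option.some.injEq] at h
        subst h
        obtain ⟨h1, h2⟩ := pvAbsorbFirst_some_elems v rest u rest' habs
        intro k' hk' x hx
        rcases List.mem_cons.mp hk' with rfl | hk'
        · rcases h1 x hx with hv | ⟨k0, hk0, hxk0⟩
          · exact ⟨v, by simp, hv⟩
          · exact ⟨k0, by simp [hk0], hxk0⟩
        · exact ⟨k', by simp [h2 k' hk'], hx⟩
    | none =>
      rw [habs] at h
      cases hrec : pvMergeStep rest with
      | none => rw [hrec] at h; simp at h
      | some rest' =>
        rw [hrec] at h
        simp only [Option.some.injEq] at h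
        subst h
        intro k' hk' x hx
        rcases List.mem_cons.mp hk' with rfl | hk'
        · exact ⟨k', by simp, hx⟩
        · obtain ⟨k, hk, hxk⟩ := ih rest' hrec k' hk' x hx
          exact ⟨k, by simp [hk], hxk⟩

-- ---- equations for pvFindIntersection ----
theorem pvFindIntersection_some {l l' : List (PySem.Set Int)} (h : pvMergeStep l = some l') :
    pvFindIntersection l = pvFindIntersection l' := by
  rw [pvFindIntersection]
  split <;> simp_all

theorem pvFindIntersection_none {l : List (PySem.Set Int)} (h : pvMergeStep l = none) :
    pvFindIntersection l = l := by
  rw [pvFindIntersection]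
  split <;> simp_all

-- ---- the head-closure view of find_intersection ----
def pvClose (v : PySem.Set Int) (rest : List (PySem.Set Int)) :
    PySem.Set Int × List (PySem.Set Int) :=
  match h : pvAbsorbFirst v rest with
  | some (u, r) => pvClose u r
  | none => (v, rest)
  termination_by rest.length
  decreasing_by have := pvAbsorbFirst_length v rest u r h; omega

theorem pvClose_some {v rest u r} (h : pvAbsorbFirst v rest = some (u, r)) :
    pvClose v rest = pvClose u r := by
  rw [pvClose]; split <;> simp_all

theorem pvClose_none {v rest} (h : pvAbsorbFirst v rest = none) :
    pvClose v rest = (v, rest) := by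
  rw [pvClose]; split <;> simp_all

theorem pvClose_snd_length (v : PySem.Set Int) (rest : List (PySem.Set Int)) :
    (pvClose v rest).2.length ≤ rest.length := by
  induction v, rest using pvClose.induct with
  | case1 v rest u r h ih =>
    rw [pvClose_some h]
    have := pvAbsorbFirst_length v rest u r h
    omega
  | case2 v rest h => rw [pvClose_none h]

def pvCloseAll : List (PySem.Set Int) → List (PySem.Set Int)
  | [] => []
  | v :: rest => (pvClose v rest).1 :: pvCloseAll (pvClose v rest).2
  termination_by l => l.length
  decreasing_by have := pvClose_snd_length v rest; simp; omega

theorem pvFindIntersection_cons_none :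
    ∀ (n : Nat) (rest : List (PySem.Set Int)) (v : PySem.Set Int), rest.length ≤ n →
      pvAbsorbFirst v rest = none →
      pvFindIntersection (v :: rest) = v :: pvFindIntersection rest := by
  intro n
  induction n with
  | zero =>
    intro rest v hlen h
    have : rest = [] := List.length_eq_zero_iff.mp (Nat.le_zero.mp hlen)
    subst this
    rw [pvFindIntersection_none (by simp [pvMergeStep, h]),
        pvFindIntersection_none (by simp [pvMergeStep])]
  | succ n ih =>
    intro rest v hlen h
    cases hm : pvMergeStep rest with
    | none =>
      rw [pvFindIntersection_none (by simp [pvMergeStep, h, hm]), pvFindIntersection_none hm]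
    | some rest' =>
      have hstep : pvMergeStep (v :: rest) = some (v :: rest') := by
        simp [pvMergeStep, h, hm]
      have habs' : pvAbsorbFirst v rest' = none := by
        rw [pvAbsorbFirst_none_iff]
        intro k' hk'
        rw [pvInterB_false_iff]
        intro x hxv hxk'
        obtain ⟨k, hk, hxk⟩ := pvMergeStep_elems rest rest' hm k' hk' x hxk'
        exact ((pvInterB_false_iff v k).mp ((pvAbsorbFirst_none_iff v rest).mp h k hk)) x hxv hxk
      have hlen' : rest'.length ≤ n := by
        have := pvMergeStep_length rest rest' hm; omega
      rw [pvFindIntersection_some hstep, ih rest' v hlen' habs',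
          pvFindIntersection_some hm]

theorem pvFindIntersection_close (v : PySem.Set Int) (rest : List (PySem.Set Int)) :
    pvFindIntersection (v :: rest)
      = (pvClose v rest).1 :: pvFindIntersection (pvClose v rest).2 := by
  induction v, rest using pvClose.induct with
  | case1 v rest u r h ih =>
    have hstep : pvMergeStep (v :: rest) = some (u :: r) := by simp [pvMergeStep, h]
    rw [pvFindIntersection_some hstep, ih, pvClose_some h]
  | case2 v rest h =>
    rw [pvClose_none h]
    exact pvFindIntersection_cons_none rest.length rest v le_rfl h

theorem pvFindIntersection_eq_closeAll : ∀ l, pvFindIntersection l = pvCloseAll l := by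
  intro l
  induction l using pvCloseAll.induct with
  | case1 =>
    rw [pvCloseAll, pvFindIntersection_none (by simp [pvMergeStep])]
  | case2 v rest ih =>
    rw [pvCloseAll, pvFindIntersection_close, ih]

-- ---- index-level closure ----
def pvIdxFirstHit (L : List (List Int)) (b : PySem.Set Int) : List Nat → Option Nat
  | [] => none
  | j :: rs => if pvInterB b (L.getD j []) then some j else pvIdxFirstHit L b rs

theorem pvIdxFirstHit_mem {L b rs j} (h : pvIdxFirstHit L b rs = some j) : j ∈ rs := by
  induction rs with
  | nil => simp [pvIdxFirstHit] at h
  | cons j0 rs ih =>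
    simp only [pvIdxFirstHit] at h
    split at h
    · simp at h; simp [h]
    · simp [ih h]

theorem pvIdxFirstHit_none_iff (L : List (List Int)) (b : PySem.Set Int) (rs : List Nat) :
    pvIdxFirstHit L b rs = none ↔ ∀ j ∈ rs, pvInterB b (L.getD j []) = false := by
  induction rs with
  | nil => simp [pvIdxFirstHit]
  | cons j0 rs ih =>
    simp only [pvIdxFirstHit]
    split
    · simp_all
    · simp_all [Bool.not_eq_true]

theorem pvIdxFirstHit_min {L b rs j} (hp : rs.Pairwise (· < ·))
    (h : pvIdxFirstHit L b rs = some j) :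
    j ∈ rs ∧ pvInterB b (L.getD j []) = true ∧
      ∀ j' ∈ rs, pvInterB b (L.getD j' []) = true → j ≤ j' := by
  induction rs with
  | nil => simp [pvIdxFirstHit] at h
  | cons j0 rs ih =>
    simp only [pvIdxFirstHit] at h
    split at h
    · rename_i hhit
      simp only [Option.some.injEq] at h
      subst h
      refine ⟨by simp, hhit, ?_⟩
      intro j' hj' _
      rcases List.mem_cons.mp hj' with rfl | hj'
      · exact le_rfl
      · exact Nat.le_of_lt ((List.pairwise_cons.mp hp).1 j' hj')
    · rename_i hmiss
      rw [Bool.not_eq_true] at hmiss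
      obtain ⟨h1, h2, h3⟩ := ih (List.pairwise_cons.mp hp).2 h
      refine ⟨by simp [h1], h2, ?_⟩
      intro j' hj' hhit'
      rcases List.mem_cons.mp hj' with rfl | hj'
      · rw [hmiss] at hhit'; simp at hhit'
      · exact h3 j' hj' hhit'

def pvIdxClose (L : List (List Int)) (b : PySem.Set Int) (rs : List Nat) :
    PySem.Set Int × List Nat :=
  match h : pvIdxFirstHit L b rs with
  | some j => pvIdxClose L (PySem.Set.union b (L.getD j [])) (rs.erase j)
  | none => (b, rs)
  termination_by rs.length
  decreasing_by
    have hmem := pvIdxFirstHit_mem h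
    have hlt := List.length_erase_of_mem hmem
    have hpos : 0 < rs.length := List.length_pos_of_mem hmem
    omega

theorem pvIdxClose_some {L b rs j} (h : pvIdxFirstHit L b rs = some j) :
    pvIdxClose L b rs = pvIdxClose L (PySem.Set.union b (L.getD j [])) (rs.erase j) := by
  rw [pvIdxClose]; split <;> simp_all

theorem pvIdxClose_none {L b rs} (h : pvIdxFirstHit L b rs = none) :
    pvIdxClose L b rs = (b, rs) := by
  rw [pvIdxClose]; split <;> simp_all

theorem pvIdxClose_fix (L : List (List Int)) (b : PySem.Set Int) (rs : List Nat) :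
    pvIdxFirstHit L (pvIdxClose L b rs).1 (pvIdxClose L b rs).2 = none := by
  induction b, rs using pvIdxClose.induct (L := L) with
  | case1 b rs j h ih => rw [pvIdxClose_some h]; exact ih
  | case2 b rs h => rw [pvIdxClose_none h]; exact h

theorem pvIdxClose_snd_sublist (L : List (List Int)) (b : PySem.Set Int) (rs : List Nat) :
    (pvIdxClose L b rs).2.Sublist rs := by
  induction b, rs using pvIdxClose.induct (L := L) with
  | case1 b rs j h ih =>
    rw [pvIdxClose_some h]
    exact ih.trans (List.erase_sublist)
  | case2 b rs h => rw [pvIdxClose_none h]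

theorem pvIdxClose_fst_mem (L : List (List Int)) (b : PySem.Set Int) (rs : List Nat) :
    ∀ x ∈ (pvIdxClose L b rs).1, x ∈ b ∨ ∃ j ∈ rs, x ∈ L.getD j [] := by
  induction b, rs using pvIdxClose.induct (L := L) with
  | case1 b rs j h ih =>
    rw [pvIdxClose_some h]
    intro x hx
    rcases ih x hx with hx' | ⟨j', hj', hxj'⟩
    · rcases (PySem.Set.mem_union _ _ x).mp hx' with hb | hj
      · exact Or.inl hb
      · exact Or.inr ⟨j, pvIdxFirstHit_mem h, hj⟩
    · exact Or.inr ⟨j', (List.erase_sublist).subset hj', hxj'⟩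
  | case2 b rs h =>
    rw [pvIdxClose_none h]
    exact fun x hx => Or.inl hx

theorem pvIdxClose_fst_nodup (L : List (List Int)) (b : PySem.Set Int) (rs : List Nat)
    (hb : b.Nodup) : (pvIdxClose L b rs).1.Nodup := by
  induction b, rs using pvIdxClose.induct (L := L) with
  | case1 b rs j h ih =>
    rw [pvIdxClose_some h]
    exact ih (PySem.Set.nodup_union _ _ hb)
  | case2 b rs h => rw [pvIdxClose_none h]; exact hb

def pvIdxCloseAll (L : List (List Int)) : List Nat → List (PySem.Set Int)
  | [] => []
  | j :: rs =>
    (pvIdxClose L (L.getD j []) rs).1 :: pvIdxCloseAll L (pvIdxClose L (L.getD j []) rs).2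
  termination_by rs => rs.length
  decreasing_by
    simp only [List.length_cons]
    have := (pvIdxClose_snd_sublist L (L.getD j []) rs).length_le
    omega

theorem pvAbsorbFirst_map_none (L : List (List Int)) (b : PySem.Set Int) {rs : List Nat}
    (h : pvIdxFirstHit L b rs = none) :
    pvAbsorbFirst b (rs.map (fun j => L.getD j [])) = none := by
  rw [pvAbsorbFirst_none_iff]
  intro k hk
  obtain ⟨j, hj, rfl⟩ := List.mem_map.mp hk
  exact (pvIdxFirstHit_none_iff L b rs).mp h j hj

theorem pvAbsorbFirst_map_some (L : List (List Int)) {b : PySem.Set Int} {rs : List Nat} {j : Nat}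
    (hnd : rs.Nodup) (h : pvIdxFirstHit L b rs = some j) :
    pvAbsorbFirst b (rs.map (fun j => L.getD j []))
      = some (PySem.Set.union b (L.getD j []), (rs.erase j).map (fun j => L.getD j [])) := by
  induction rs with
  | nil => simp [pvIdxFirstHit] at h
  | cons j0 rs ih =>
    simp only [pvIdxFirstHit] at h
    split at h
    · rename_i hhit
      obtain rfl : j0 = j := by simpa using h
      have hhit2 : pvInterB b (L[j0]?.getD []) = true := hhit
      simp [pvAbsorbFirst, hhit2, List.erase_cons_head]
    · rename_i hmiss
      rw [Bool.not_eq_true] at hmiss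
      have hj : j ∈ rs := pvIdxFirstHit_mem h
      have hne : j0 ≠ j := fun e => (List.nodup_cons.mp hnd).1 (e ▸ hj)
      simp only [List.map_cons, pvAbsorbFirst, hmiss, Bool.false_eq_true, if_false]
      rw [ih (List.nodup_cons.mp hnd).2 h]
      rw [List.erase_cons_tail (by simpa using hne)]
      simp

theorem pvClose_map (L : List (List Int)) :
    ∀ (n : Nat) (rs : List Nat) (b : PySem.Set Int), rs.length ≤ n → rs.Nodup →
      pvClose b (rs.map (fun j => L.getD j []))
        = ((pvIdxClose L b rs).1, (pvIdxClose L b rs).2.map (fun j => L.getD j [])) := by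
  intro n
  induction n with
  | zero =>
    intro rs b hlen _
    have : rs = [] := List.length_eq_zero_iff.mp (Nat.le_zero.mp hlen)
    subst this
    rw [pvIdxClose_none (by simp [pvIdxFirstHit]), pvClose_none (by simp [pvAbsorbFirst])]
  | succ n ih =>
    intro rs b hlen hnd
    cases hfh : pvIdxFirstHit L b rs with
    | none =>
      rw [pvIdxClose_none hfh, pvClose_none (pvAbsorbFirst_map_none L b hfh)]
    | some j =>
      rw [pvIdxClose_some hfh, pvClose_some (pvAbsorbFirst_map_some L hnd hfh)]
      have hjmem := pvIdxFirstHit_mem hfh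
      have hlen' : (rs.erase j).length ≤ n := by
        have := List.length_erase_of_mem hjmem
        have := List.length_pos_of_mem hjmem
        omega
      exact ih (rs.erase j) _ hlen' (hnd.erase j)

-- closeAll over a list of positions equals the index-level closure
theorem pvCloseAll_map (L : List (List Int)) :
    ∀ rs : List Nat, rs.Nodup →
      pvCloseAll (rs.map (fun j => L.getD j [])) = pvIdxCloseAll L rs := by
  intro rs
  induction rs using pvIdxCloseAll.induct L with
  | case1 => intro _; rw [List.map_nil, pvCloseAll, pvIdxCloseAll]
  | case2 j rs ih =>
    intro hnd
    obtain ⟨hj, hnd'⟩ := List.nodup_cons.mp hnd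
    rw [List.map_cons, pvCloseAll, pvIdxCloseAll,
        pvClose_map L rs.length rs (L.getD j []) le_rfl hnd']
    have hnd2 : (pvIdxClose L (L.getD j []) rs).2.Nodup :=
      (pvIdxClose_snd_sublist L _ rs).nodup hnd'
    simp only []
    rw [ih hnd2]

theorem pvIdxCloseAll_mem (L : List (List Int)) :
    ∀ rs : List Nat, ∀ c ∈ pvIdxCloseAll L rs, ∀ x ∈ c, ∃ j ∈ rs, x ∈ L.getD j [] := by
  intro rs
  induction rs using pvIdxCloseAll.induct L with
  | case1 => simp [pvIdxCloseAll]
  | case2 j rs ih =>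
    rw [pvIdxCloseAll]
    intro c hc x hx
    rcases List.mem_cons.mp hc with rfl | hc
    · rcases pvIdxClose_fst_mem L (L.getD j []) rs x hx with hxb | ⟨j', hj', hxj'⟩
      · exact ⟨j, by simp, hxb⟩
      · exact ⟨j', by simp [hj'], hxj'⟩
    · obtain ⟨j', hj', hxj'⟩ := ih c hc x hx
      exact ⟨j', by simp [(pvIdxClose_snd_sublist L _ rs).subset hj'], hxj'⟩

theorem pvIdxCloseAll_nodup (L : List (List Int)) (hnd : ∀ j, (L.getD j []).Nodup) :
    ∀ rs : List Nat, ∀ c ∈ pvIdxCloseAll L rs, c.Nodup := by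
  intro rs
  induction rs using pvIdxCloseAll.induct L with
  | case1 => simp [pvIdxCloseAll]
  | case2 j rs ih =>
    rw [pvIdxCloseAll]
    intro c hc
    rcases List.mem_cons.mp hc with rfl | hc
    · exact pvIdxClose_fst_nodup L _ rs (hnd j)
    · exact ih c hc

theorem pvIdxCloseAll_pairwise (L : List (List Int)) :
    ∀ rs : List Nat,
      (pvIdxCloseAll L rs).Pairwise (fun c d => ∀ x ∈ c, x ∉ d) := by
  intro rs
  induction rs using pvIdxCloseAll.induct L with
  | case1 => simp [pvIdxCloseAll]
  | case2 j rs ih =>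
    rw [pvIdxCloseAll]
    refine List.pairwise_cons.mpr ⟨?_, ih⟩
    intro d hd x hx hxd
    obtain ⟨j', hj', hxj'⟩ := pvIdxCloseAll_mem L _ d hd x hxd
    have hfix := pvIdxClose_fix L (L.getD j []) rs
    have := (pvIdxFirstHit_none_iff L _ _).mp hfix j' hj'
    exact ((pvInterB_false_iff _ _).mp this) x hx hxj'

-- ---- labelled flattening ----
def pvLabFlat : List (PySem.Set Int) → Int → List (Int × Int)
  | [], _ => []
  | c :: cs, k => c.map (fun x => (x, k)) ++ pvLabFlat cs (k + 1)

-- ---- the A-side dict build is the labelled flattening ----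
theorem pvTurn_inner (lab : Int) :
    ∀ (c : List Int) (d : PySem.Dict Int Int), (∀ x ∈ c, d.contains x = false) → c.Nodup →
      (c.foldl (fun rd e => if !(rd.contains e) then rd.insert e lab else rd) d).items
          = d.items ++ c.map (fun x => (x, lab)) ∧
      (∀ x, (c.foldl (fun rd e => if !(rd.contains e) then rd.insert e lab else rd) d).contains x
          = (d.contains x || decide (x ∈ c))) := by
  intro c
  induction c with
  | nil => intro d _ _; simp
  | cons x xs ih =>
    intro d hfresh hnd
    have hx : d.contains x = false := hfresh x (by simp)
    obtain ⟨hnx, hnd'⟩ := List.nodup_cons.mp hnd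
    simp only [List.foldl_cons, hx, Bool.not_false, if_true]
    have hfresh' : ∀ y ∈ xs, (d.insert x lab).contains y = false := by
      intro y hy
      rw [PySem.Dict.contains_insert]
      have hne : y ≠ x := fun e => hnx (e ▸ hy)
      simp [hne, hfresh y (by simp [hy])]
    obtain ⟨h1, h2⟩ := ih (d.insert x lab) hfresh' hnd'
    constructor
    · rw [h1, PySem.Dict.items_insert_of_not_contains d lab hx]
      simp
    · intro y
      rw [h2 y, PySem.Dict.contains_insert]
      by_cases hyx : y = x
      · subst hyx; simp
      · have hbx : (y == x) = false := by simp [hyx]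
        simp [hbx, List.mem_cons, hyx, Bool.or_assoc]

theorem pvTurn_go :
    ∀ (comps : List (PySem.Set Int)) (s : Int) (d : PySem.Dict Int Int),
      (∀ c ∈ comps, c.Nodup) →
      comps.Pairwise (fun c d => ∀ x ∈ c, x ∉ d) →
      (∀ c ∈ comps, ∀ x ∈ c, d.contains x = false) →
      ((PySem.List.enumerate comps s).foldl (fun rd p =>
        p.2.foldl (fun rd elem =>
          if !(rd.contains elem) then rd.insert elem (p.1 + 1) else rd) rd) d).items
        = d.items ++ pvLabFlat comps (s + 1) := by
  intro comps
  induction comps with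
  | nil => intro s d _ _ _; simp [PySem.List.enumerate_nil, pvLabFlat]
  | cons c cs ih =>
    intro s d hnd hdisj hfresh
    rw [PySem.List.enumerate_cons, List.foldl_cons]
    obtain ⟨h1, h2⟩ := pvTurn_inner (s + 1) c d (fun x hx => hfresh c (by simp) x hx)
      (hnd c (by simp))
    obtain ⟨hdc, hdisj'⟩ := List.pairwise_cons.mp hdisj
    have hfresh' : ∀ c' ∈ cs, ∀ x ∈ c',
        (c.foldl (fun rd e => if !(rd.contains e) then rd.insert e (s + 1) else rd) d).contains x
          = false := by
      intro c' hc' x hx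
      rw [h2 x]
      have hxc : x ∉ c := fun hxc => hdc c' hc' x hxc hx
      simp [hfresh c' (by simp [hc']) x hx, hxc]
    have := ih (s + 1) _ (fun c' hc' => hnd c' (by simp [hc'])) hdisj' hfresh'
    simp only [] at this ⊢
    rw [this, h1, pvLabFlat]
    simp [List.append_assoc]

theorem pvTurn_items (comps : List (PySem.Set Int))
    (hnd : ∀ c ∈ comps, c.Nodup)
    (hdisj : comps.Pairwise (fun c d => ∀ x ∈ c, x ∉ d)) :
    (pvTurnSetToMappingDict comps).items = pvLabFlat comps 1 := by
  have hempty : (PySem.Dict.empty : PySem.Dict Int Int).items = [] := rfl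
  have := pvTurn_go comps 0 PySem.Dict.empty hnd hdisj
    (by intro c hc x hx; simp [PySem.Dict.contains_empty])
  simp only [pvTurnSetToMappingDict]
  rw [this, hempty]
  norm_num

-- ---- the inverted index ----
theorem pvBuildIndex_mem (L : List (List Int)) (x : Int) (j : Nat) :
    j ∈ (pvBuildIndex L).getD x [] ↔ ∃ h : j < L.length, x ∈ L[j] := by
  have aux : ∀ (l : List (List Int × Nat)) (d : PySem.Dict Int (List Nat)),
      (j ∈ (l.foldl (fun d p =>
          p.1.foldl (fun d x => d.modify x [] (fun l => l ++ [p.2])) d) d).getD x [])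
        ↔ j ∈ d.getD x [] ∨ ∃ p ∈ l, x ∈ p.1 ∧ j = p.2 := by
    intro l
    induction l with
    | nil => simp
    | cons p l ih =>
      intro d
      rw [List.foldl_cons, ih]
      have hinner : (p.1.foldl (fun d y => d.modify y [] (fun t => t ++ [p.2])) d)
          = ((p.1.map (fun y => ((y, p.2) : Int × Nat))).foldl
              (fun d q => d.modify q.1 [] (fun t => t ++ [q.2])) d) := by
        rw [List.foldl_map]
      rw [hinner, PySem.Dict.getD_foldl_modify_append]
      have hmid : (j ∈ ((p.1.map (fun y => ((y, p.2) : Int × Nat))).filter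
          (fun q => q.1 == x)).map (fun q => q.2)) ↔ (x ∈ p.1 ∧ j = p.2) := by
        simp only [List.mem_map, List.mem_filter]
        constructor
        · rintro ⟨q, ⟨⟨y, hy, rfl⟩, hq⟩, rfl⟩
          simp only [beq_iff_eq] at hq
          exact ⟨hq ▸ hy, rfl⟩
        · rintro ⟨hx', rfl⟩
          exact ⟨(x, p.2), ⟨⟨x, hx', rfl⟩, by simp⟩, rfl⟩
      rw [List.mem_append, hmid, List.exists_mem_cons_iff]
      tauto
  have hzip : (∃ p ∈ L.zipIdx, x ∈ p.1 ∧ j = p.2) ↔ ∃ h : j < L.length, x ∈ L[j] := by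
    constructor
    · rintro ⟨⟨a, i⟩, hp, hx, rfl⟩
      obtain ⟨-, hi, ha⟩ := List.mem_zipIdx hp
      refine ⟨by simpa using hi, ?_⟩
      simpa using ha ▸ hx
    · rintro ⟨hj, hx⟩
      refine ⟨(L[j], j), ?_, hx, rfl⟩
      have hlen : j < L.zipIdx.length := by simpa using hj
      have : L.zipIdx[j] = (L[j], j) := by simp
      exact this ▸ List.getElem_mem hlen
  rw [pvBuildIndex, aux, hzip]
  simp

-- ---- remaining (unabsorbed) indices ----
def pvRem (absorbed : List Bool) : List Nat :=
  (List.range absorbed.length).filter (fun j => !(absorbed.getD j true))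

theorem pvMem_rem (a : List Bool) (j : Nat) :
    j ∈ pvRem a ↔ j < a.length ∧ a.getD j true = false := by
  simp [pvRem, List.mem_filter, List.mem_range]

theorem pvRem_pairwise (a : List Bool) : (pvRem a).Pairwise (· < ·) :=
  List.Pairwise.filter _ List.pairwise_lt_range

theorem pvRem_nodup (a : List Bool) : (pvRem a).Nodup :=
  (pvRem_pairwise a).imp Nat.ne_of_lt

theorem pvGetD_false_lt (a : List Bool) (j : Nat) (h : a.getD j true = false) :
    j < a.length := by
  by_contra hge
  rw [List.getD_eq_getElem?_getD, List.getElem?_eq_none (by omega)] at h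
  simp at h

theorem pvRem_set_true (a : List Bool) (j : Nat) (h : a.getD j true = false) :
    pvRem (a.set j true) = (pvRem a).erase j := by
  have hlt := pvGetD_false_lt a j h
  rw [(pvRem_nodup a).erase_eq_filter j]
  simp only [pvRem, List.length_set, List.filter_filter]
  apply List.filter_congr
  intro i hi
  by_cases hij : i = j
  · subst hij
    simp [List.getD_eq_getElem?_getD, List.getElem?_set, hlt]
  · simp [List.getD_eq_getElem?_getD, List.getElem?_set, Ne.symm hij, hij]

theorem pvRem_replicate (n : Nat) : pvRem (List.replicate n false) = List.range n := by
  simp only [pvRem, List.length_replicate]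
  rw [List.filter_eq_self]
  intro j hj
  simp [List.getD_eq_getElem?_getD, List.getElem?_replicate, List.mem_range.mp hj]

theorem pvRem_length_le (a : List Bool) : (pvRem a).length ≤ a.length := by
  have := (List.filter_sublist (l := List.range a.length)
    (p := fun j => !(a.getD j true))).length_le
  simpa using this

-- ---- min over avail = first hit in the remaining list ----
theorem pvMin_avail_eq_firstHit (L : List (List Int)) (b : PySem.Set Int)
    (rs : List Nat) (hp : rs.Pairwise (· < ·)) (avail : List Nat)
    (hm : ∀ j, j ∈ avail ↔ j ∈ rs ∧ pvInterB b (L.getD j []) = true) :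
    PySem.List.min? avail (fun j => j) = pvIdxFirstHit L b rs := by
  cases hfh : pvIdxFirstHit L b rs with
  | none =>
    rw [PySem.List.min?_eq_none_iff, List.eq_nil_iff_forall_not_mem]
    intro j hj
    obtain ⟨hjrs, hhit⟩ := (hm j).mp hj
    rw [(pvIdxFirstHit_none_iff L b rs).mp hfh j hjrs] at hhit
    simp at hhit
  | some j =>
    obtain ⟨hjrs, hhit, hmin⟩ := pvIdxFirstHit_min hp hfh
    have hja : j ∈ avail := (hm j).mpr ⟨hjrs, hhit⟩
    cases hmv : PySem.List.min? avail (fun j => j) with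
    | none =>
      rw [PySem.List.min?_eq_none_iff] at hmv
      rw [hmv] at hja; simp at hja
    | some m =>
      have hma := PySem.List.min?_mem hmv
      have h1 : m ≤ j := PySem.List.min?_isMin hmv j hja
      obtain ⟨hmrs, hmhit⟩ := (hm m).mp hma
      have h2 : j ≤ m := hmin m hmrs hmhit
      simp [Nat.le_antisymm h1 h2]

theorem pvGetD_lt (L : List (List Int)) (j : Nat) (h : j < L.length) : L.getD j [] = L[j] := by
  simp [List.getD_eq_getElem?_getD, List.getElem?_eq_getElem h]

-- ---- _absorb simulation ----
theorem pvAbsorbElems_spec (L : List (List Int)) (label : Int) :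
    ∀ (xs : List Int) (b : PySem.Set Int) (r : PySem.Dict Int Int) (c : PySem.Set Nat)
      (pr : List (Int × Int)) (Q : Int → Prop),
      b.Nodup →
      (∀ x, r.contains x = true ↔ Q x ∨ x ∈ b) →
      r.items = pr ++ b.map (fun x => (x, label)) →
      (∀ x ∈ xs, ¬ Q x) →
      (∀ j, j ∈ c ↔ j < L.length ∧ ∃ x ∈ b, x ∈ L.getD j []) →
      (pvAbsorbElems label (pvBuildIndex L) xs (r, c)).1.items
          = pr ++ (PySem.Set.update b xs).map (fun x => (x, label)) ∧
      (∀ x, (pvAbsorbElems label (pvBuildIndex L) xs (r, c)).1.contains x = true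
          ↔ Q x ∨ x ∈ PySem.Set.update b xs) ∧
      (∀ j, j ∈ (pvAbsorbElems label (pvBuildIndex L) xs (r, c)).2
          ↔ j < L.length ∧ ∃ x ∈ PySem.Set.update b xs, x ∈ L.getD j []) ∧
      (PySem.Set.update b xs).Nodup := by
  intro xs
  induction xs with
  | nil =>
    intro b r c pr Q hb hcon hitems hfresh hcand
    simp only [pvAbsorbElems, List.foldl_nil, PySem.Set.update_nil]
    exact ⟨hitems, hcon, hcand, hb⟩
  | cons x xs ih =>
    intro b r c pr Q hb hcon hitems hfresh hcand
    have hstep : pvAbsorbElems label (pvBuildIndex L) (x :: xs) (r, c)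
        = pvAbsorbElems label (pvBuildIndex L) xs
            (if !(r.contains x)
             then (r.insert x label, PySem.Set.update c ((pvBuildIndex L).getD x []))
             else (r, c)) := by
      simp only [pvAbsorbElems, List.foldl_cons]
    rw [PySem.Set.update_cons]
    by_cases hcx : r.contains x = true
    · have hxb : x ∈ b := by
        rcases (hcon x).mp hcx with hQ | hxb
        · exact absurd hQ (hfresh x (by simp))
        · exact hxb
      have hred : (if !(r.contains x)
          then (r.insert x label, PySem.Set.update c ((pvBuildIndex L).getD x []))
          else (r, c)) = (r, c) := by simp [hcx]
      rw [PySem.Set.add_of_mem hxb, hstep, hred]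
      exact ih b r c pr Q hb hcon hitems (fun y hy => hfresh y (by simp [hy])) hcand
    · have hcx' : r.contains x = false := by
        cases h : r.contains x
        · rfl
        · exact absurd h hcx
      have hxb : x ∉ b := fun hxb => hcx ((hcon x).mpr (Or.inr hxb))
      have hQx : ¬ Q x := hfresh x (by simp)
      have hred : (if !(r.contains x)
          then (r.insert x label, PySem.Set.update c ((pvBuildIndex L).getD x []))
          else (r, c))
          = (r.insert x label, PySem.Set.update c ((pvBuildIndex L).getD x [])) := by
        simp [hcx']
      rw [PySem.Set.add_of_not_mem hxb, hstep, hred]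
      apply ih (b ++ [x]) (r.insert x label)
        (PySem.Set.update c ((pvBuildIndex L).getD x [])) pr Q
      · have := PySem.Set.nodup_add (s := b) (x := x) hb
        rwa [PySem.Set.add_of_not_mem hxb] at this
      · intro y
        rw [PySem.Dict.contains_insert]
        by_cases hyx : y = x
        · subst hyx; simp
        · have hbeq : (y == x) = false := by simp [hyx]
          simp only [hbeq, Bool.false_or]
          rw [hcon y]
          simp [List.mem_append, hyx]
      · rw [PySem.Dict.items_insert_of_not_contains r label hcx', hitems]
        simp
      · exact fun y hy => hfresh y (by simp [hy])
      · intro j0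
        rw [PySem.Set.mem_update]
        constructor
        · rintro (hj0 | hj0)
          · obtain ⟨hlt, y, hyb, hyj⟩ := (hcand j0).mp hj0
            exact ⟨hlt, y, by simp [hyb], hyj⟩
          · obtain ⟨hlt, hxj⟩ := (pvBuildIndex_mem L x j0).mp hj0
            exact ⟨hlt, x, by simp, by rwa [pvGetD_lt L j0 hlt]⟩
        · rintro ⟨hlt, y, hy, hyj⟩
          rcases List.mem_append.mp hy with hyb | hyx
          · exact Or.inl ((hcand j0).mpr ⟨hlt, y, hyb, hyj⟩)
          · obtain rfl : y = x := by simpa using hyx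
            exact Or.inr ((pvBuildIndex_mem L y j0).mpr
              ⟨hlt, by rwa [pvGetD_lt L j0 hlt] at hyj⟩)

-- ---- the while-loop simulation ----
theorem pvCloseLoop_sim (L : List (List Int)) (label : Int) :
    ∀ (fuel : Nat) (absorbed : List Bool) (r : PySem.Dict Int Int) (c : PySem.Set Nat)
      (b : PySem.Set Int) (pr : List (Int × Int)) (Q : Int → Prop),
      absorbed.length = L.length →
      (pvRem absorbed).length ≤ fuel →
      b.Nodup →
      (∀ x, r.contains x = true ↔ Q x ∨ x ∈ b) →
      r.items = pr ++ b.map (fun x => (x, label)) →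
      (∀ j ∈ pvRem absorbed, ∀ x ∈ L.getD j [], ¬ Q x) →
      (∀ j, j ∈ c ↔ j < L.length ∧ ∃ x ∈ b, x ∈ L.getD j []) →
      (pvCloseLoop L (pvBuildIndex L) label fuel absorbed r c).2.items
          = pr ++ (pvIdxClose L b (pvRem absorbed)).1.map (fun x => (x, label)) ∧
      (∀ x, (pvCloseLoop L (pvBuildIndex L) label fuel absorbed r c).2.contains x = true
          ↔ Q x ∨ x ∈ (pvIdxClose L b (pvRem absorbed)).1) ∧
      pvRem (pvCloseLoop L (pvBuildIndex L) label fuel absorbed r c).1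
          = (pvIdxClose L b (pvRem absorbed)).2 ∧
      (pvCloseLoop L (pvBuildIndex L) label fuel absorbed r c).1.length = L.length ∧
      (pvIdxClose L b (pvRem absorbed)).1.Nodup := by
  intro fuel
  induction fuel with
  | zero =>
    intro absorbed r c b pr Q hlen hfuel hb hcon hitems hQf hcand
    have hrem : pvRem absorbed = [] := List.length_eq_zero_iff.mp (Nat.le_zero.mp hfuel)
    simp only [pvCloseLoop]
    rw [hrem, pvIdxClose_none (by simp [pvIdxFirstHit])]
    exact ⟨hitems, hcon, rfl, hlen, hb⟩
  | succ fuel ih =>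
    intro absorbed r c b pr Q hlen hfuel hb hcon hitems hQf hcand
    have havail : ∀ j, j ∈ pvAvail c absorbed
        ↔ j ∈ pvRem absorbed ∧ pvInterB b (L.getD j []) = true := by
      intro j
      simp only [pvAvail, List.mem_filter, Bool.not_eq_true']
      rw [hcand j, pvMem_rem, pvInterB_true_iff]
      constructor
      · rintro ⟨⟨hlt, hex⟩, hab⟩
        exact ⟨⟨by omega, hab⟩, hex⟩
      · rintro ⟨⟨hlt, hab⟩, hex⟩
        exact ⟨⟨by omega, hex⟩, hab⟩
    simp only [pvCloseLoop]
    rw [pvMin_avail_eq_firstHit L b (pvRem absorbed) (pvRem_pairwise absorbed) _ havail]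
    cases hfh : pvIdxFirstHit L b (pvRem absorbed) with
    | none =>
      rw [pvIdxClose_none hfh]
      exact ⟨hitems, hcon, rfl, hlen, hb⟩
    | some j =>
      obtain ⟨hjrem, hhit, -⟩ := pvIdxFirstHit_min (pvRem_pairwise absorbed) hfh
      obtain ⟨hjlt, hjfalse⟩ := (pvMem_rem absorbed j).mp hjrem
      have hrem' := pvRem_set_true absorbed j hjfalse
      obtain ⟨s1, s2, s3, s4⟩ := pvAbsorbElems_spec L label (L.getD j []) b r c pr Q
        hb hcon hitems (hQf j hjrem) hcand
      have hITER := ih (absorbed.set j true)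
          (pvAbsorbElems label (pvBuildIndex L) (L.getD j []) (r, c)).1
          (pvAbsorbElems label (pvBuildIndex L) (L.getD j []) (r, c)).2
          (PySem.Set.update b (L.getD j [])) pr Q
          (by simpa using hlen)
          (by rw [hrem']
              have h1 := List.length_erase_of_mem hjrem
              have h2 := List.length_pos_of_mem hjrem
              omega)
          s4 s2 s1
          (by rw [hrem']; intro j' hj'; exact hQf j' ((List.erase_sublist).subset hj'))
          s3
      rw [pvIdxClose_some hfh]
      have huu : PySem.Set.union b (L.getD j []) = PySem.Set.update b (L.getD j []) := rfl
      rw [huu, ← hrem']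
      exact hITER

-- ---- head of a sorted list with a minimum ----
theorem pvSortedHead (a : Nat) :
    ∀ l : List Nat, l.Pairwise (· < ·) → a ∈ l → (∀ b ∈ l, a ≤ b) → l = a :: l.erase a := by
  intro l hp ha hmin
  cases l with
  | nil => simp at ha
  | cons h t =>
    have : h = a := by
      rcases List.mem_cons.mp ha with rfl | hat
      · rfl
      · have h1 : h < a := (List.pairwise_cons.mp hp).1 a hat
        have h2 : a ≤ h := hmin h (by simp)
        omega
    subst this
    simp [List.erase_cons_head]

-- ---- the outer loop simulation ----
theorem pvOuter_sim (L : List (List Int)) (hnd : ∀ j, (L.getD j []).Nodup) :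
    ∀ (is : List Nat) (absorbed : List Bool) (r : PySem.Dict Int Int) (label : Int),
      absorbed.length = L.length →
      is.Pairwise (· < ·) →
      (∀ j ∈ pvRem absorbed, j ∈ is) →
      (∀ j ∈ pvRem absorbed, ∀ x ∈ L.getD j [], r.contains x = false) →
      (is.foldl (pvOuterStep L (pvBuildIndex L)) (absorbed, r, label)).2.1.items
        = r.items ++ pvLabFlat (pvIdxCloseAll L (pvRem absorbed)) (label + 1) := by
  intro is
  induction is with
  | nil =>
    intro absorbed r label hlen hp hsub hfresh
    have hrem : pvRem absorbed = [] :=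
      List.eq_nil_iff_forall_not_mem.mpr (fun j hj => by simpa using hsub j hj)
    rw [List.foldl_nil, hrem, pvIdxCloseAll]
    simp [pvLabFlat]
  | cons i is' ih =>
    intro absorbed r label hlen hp hsub hfresh
    obtain ⟨hpi, hp'⟩ := List.pairwise_cons.mp hp
    rw [List.foldl_cons]
    cases habs : absorbed.getD i true with
    | true =>
      have habs2 : absorbed[i]?.getD true = true := habs
      have hred : pvOuterStep L (pvBuildIndex L) (absorbed, r, label) i
          = (absorbed, r, label) := by
        simp [pvOuterStep, habs2]
      rw [hred]
      apply ih absorbed r label hlen hp'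
      · intro j hj
        rcases List.mem_cons.mp (hsub j hj) with rfl | h
        · rw [((pvMem_rem absorbed j).mp hj).2] at habs; cases habs
        · exact h
      · exact hfresh
    | false =>
      have hilt := pvGetD_false_lt absorbed i habs
      have himem : i ∈ pvRem absorbed := (pvMem_rem absorbed i).mpr ⟨hilt, habs⟩
      have hmin : ∀ b ∈ pvRem absorbed, i ≤ b := by
        intro b hb
        rcases List.mem_cons.mp (hsub b hb) with rfl | h
        · exact le_rfl
        · exact Nat.le_of_lt (hpi b h)
      have hhead := pvSortedHead i (pvRem absorbed) (pvRem_pairwise absorbed) himem hmin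
      have hrem' := pvRem_set_true absorbed i habs
      have hred : pvOuterStep L (pvBuildIndex L) (absorbed, r, label) i
          = ((pvCloseLoop L (pvBuildIndex L) (label + 1) L.length (absorbed.set i true)
              (pvAbsorbElems (label + 1) (pvBuildIndex L) (L.getD i []) (r, PySem.Set.empty)).1
              (pvAbsorbElems (label + 1) (pvBuildIndex L) (L.getD i [])
                (r, PySem.Set.empty)).2).1,
             (pvCloseLoop L (pvBuildIndex L) (label + 1) L.length (absorbed.set i true)
              (pvAbsorbElems (label + 1) (pvBuildIndex L) (L.getD i []) (r, PySem.Set.empty)).1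
              (pvAbsorbElems (label + 1) (pvBuildIndex L) (L.getD i [])
                (r, PySem.Set.empty)).2).2,
             label + 1) := by
        have habs2 : absorbed[i]?.getD true = false := habs
        simp [pvOuterStep, habs2]
      obtain ⟨s1, s2, s3, s4⟩ := pvAbsorbElems_spec L (label + 1) (L.getD i [])
          [] r PySem.Set.empty r.items (fun x => r.contains x = true)
          List.nodup_nil
          (by intro x; simp)
          (by simp)
          (by intro x hx h
              have h2 : r.contains x = true := h
              rw [hfresh i himem x hx] at h2
              cases h2)
          (by intro j0; constructor
              · intro h; simp [PySem.Set.empty] at h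
              · rintro ⟨-, y, hy, -⟩; simp at hy)
      have hupd : PySem.Set.update ([] : PySem.Set Int) (L.getD i []) = L.getD i [] := by
        rw [PySem.Set.update_nil_left]
        exact PySem.Set.ofList_eq_self_of_nodup _ (hnd i)
      rw [hupd] at s1 s2 s3 s4
      obtain ⟨t1, t2, t3, t4, t5⟩ := pvCloseLoop_sim L (label + 1) L.length
          (absorbed.set i true)
          (pvAbsorbElems (label + 1) (pvBuildIndex L) (L.getD i []) (r, PySem.Set.empty)).1
          (pvAbsorbElems (label + 1) (pvBuildIndex L) (L.getD i []) (r, PySem.Set.empty)).2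
          (L.getD i []) r.items (fun x => r.contains x = true)
          (by simpa using hlen)
          (by rw [hrem']
              calc ((pvRem absorbed).erase i).length
                  ≤ (pvRem absorbed).length := (List.erase_sublist).length_le
                _ ≤ absorbed.length := pvRem_length_le absorbed
                _ = L.length := hlen)
          (hnd i) s2 s1
          (by rw [hrem']
              intro j hj x hx h
              have h2 : r.contains x = true := h
              rw [hfresh j ((List.erase_sublist).subset hj) x hx] at h2
              cases h2)
          s3
      have hfix := pvIdxClose_fix L (L.getD i []) (pvRem (absorbed.set i true))
      have hsub2 : ∀ j ∈ pvRem (pvCloseLoop L (pvBuildIndex L) (label + 1) L.length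
          (absorbed.set i true)
          (pvAbsorbElems (label + 1) (pvBuildIndex L) (L.getD i []) (r, PySem.Set.empty)).1
          (pvAbsorbElems (label + 1) (pvBuildIndex L) (L.getD i [])
            (r, PySem.Set.empty)).2).1, j ∈ is' := by
        rw [t3]
        intro j hj
        have hjsub : j ∈ pvRem (absorbed.set i true) :=
          (pvIdxClose_snd_sublist L _ _).subset hj
        rw [hrem'] at hjsub
        obtain ⟨hne, hjrem⟩ := (List.Nodup.mem_erase_iff (pvRem_nodup absorbed)).mp hjsub
        rcases List.mem_cons.mp (hsub j hjrem) with rfl | h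
        · exact absurd rfl hne
        · exact h
      have hfresh2 : ∀ j ∈ pvRem (pvCloseLoop L (pvBuildIndex L) (label + 1) L.length
          (absorbed.set i true)
          (pvAbsorbElems (label + 1) (pvBuildIndex L) (L.getD i []) (r, PySem.Set.empty)).1
          (pvAbsorbElems (label + 1) (pvBuildIndex L) (L.getD i [])
            (r, PySem.Set.empty)).2).1, ∀ x ∈ L.getD j [],
          (pvCloseLoop L (pvBuildIndex L) (label + 1) L.length
          (absorbed.set i true)
          (pvAbsorbElems (label + 1) (pvBuildIndex L) (L.getD i []) (r, PySem.Set.empty)).1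
          (pvAbsorbElems (label + 1) (pvBuildIndex L) (L.getD i [])
            (r, PySem.Set.empty)).2).2.contains x = false := by
        intro j hj x hx
        rw [t3] at hj
        have hjsub : j ∈ pvRem (absorbed.set i true) :=
          (pvIdxClose_snd_sublist L _ _).subset hj
        have hQx : r.contains x = false := by
          rw [hrem'] at hjsub
          exact hfresh j ((List.erase_sublist).subset hjsub) x hx
        have hnp : x ∉ (pvIdxClose L (L.getD i []) (pvRem (absorbed.set i true))).1 := by
          intro hxp
          have hdis := (pvIdxFirstHit_none_iff L _ _).mp hfix j hj
          exact ((pvInterB_false_iff _ _).mp hdis) x hxp hx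
        cases hc : (pvCloseLoop L (pvBuildIndex L) (label + 1) L.length
            (absorbed.set i true)
            (pvAbsorbElems (label + 1) (pvBuildIndex L) (L.getD i []) (r, PySem.Set.empty)).1
            (pvAbsorbElems (label + 1) (pvBuildIndex L) (L.getD i [])
              (r, PySem.Set.empty)).2).2.contains x
        · rfl
        · rcases (t2 x).mp hc with hQ | hp1
          · have hQ2 : r.contains x = true := hQ
            rw [hQx] at hQ2; cases hQ2
          · exact absurd hp1 hnp
      have hIH := ih _ _ (label + 1) t4 hp' hsub2 hfresh2
      rw [hred]
      rw [hIH, t1]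
      conv_rhs => rw [hhead]
      rw [pvIdxCloseAll, pvLabFlat, ← hrem', t3]
      simp [List.append_assoc]

-- ---- assembling the two sides ----
theorem pvBuildSets_eq (sp : List (List (List Int))) :
    pvBuildSets sp
      = (((sp.map (fun elem => (PySem.List.pyGet? elem 0).getD [])).filter
          (fun i => !i.isEmpty)).map (fun i => PySem.Set.ofList i)) := by
  have aux : ∀ (l : List (List (List Int))) (acc : List (List Int)),
      l.foldl (fun acc pair =>
        if (!((PySem.List.pyGet? pair 0).getD []).isEmpty) = true
        then acc ++ [PySem.List.dedup ((PySem.List.pyGet? pair 0).getD [])] else acc) acc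
      = acc ++ ((l.filter (fun pair => !((PySem.List.pyGet? pair 0).getD []).isEmpty)).map
          (fun pair => PySem.Set.ofList ((PySem.List.pyGet? pair 0).getD []))) := by
    intro l
    induction l with
    | nil => simp
    | cons pair rest ih =>
      intro acc
      rw [List.foldl_cons]
      by_cases hp : (!((PySem.List.pyGet? pair 0).getD []).isEmpty) = true
      · rw [if_pos hp, ih]
        simp [List.filter_cons, hp, PySem.List.dedup_eq_ofList]
      · rw [if_neg hp, ih]
        simp [List.filter_cons, hp]
  have h0 : pvBuildSets sp
      = [] ++ ((sp.filter (fun pair => !((PySem.List.pyGet? pair 0).getD []).isEmpty)).map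
          (fun pair => PySem.Set.ofList ((PySem.List.pyGet? pair 0).getD []))) := aux sp []
  rw [h0, List.nil_append, List.filter_map, List.map_map]
  rfl

theorem pvMap_getD_range (L : List (List Int)) :
    (List.range L.length).map (fun j => L.getD j []) = L := by
  apply List.ext_getElem (by simp)
  intro k h1 h2
  simp [List.getD_eq_getElem?_getD, List.getElem?_eq_getElem (by simpa using h2)]

theorem pvBuildSets_nodup (sp : List (List (List Int))) :
    ∀ j, ((pvBuildSets sp).getD j []).Nodup := by
  intro j
  rcases Nat.lt_or_ge j (pvBuildSets sp).length with hj | hj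
  · have hmem : ∀ c ∈ pvBuildSets sp, c.Nodup := by
      intro c hc
      rw [pvBuildSets_eq sp] at hc
      obtain ⟨y, -, hy⟩ := List.mem_map.mp hc
      rw [← hy]
      exact PySem.Set.nodup_ofList y
    rw [pvGetD_lt _ _ hj]
    exact hmem _ (List.getElem_mem hj)
  · rw [List.getD_eq_getElem?_getD, List.getElem?_eq_none (by omega)]
    exact List.nodup_nil

theorem get_mapping_dict_main (selected_pairs : List (List (List Int))) :
    get_mapping_dict selected_pairs = get_mapping_dict_alt selected_pairs := by
  have hnd := pvBuildSets_nodup selected_pairs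
  simp only [get_mapping_dict, get_mapping_dict_alt]
  rw [← pvBuildSets_eq selected_pairs, pvFindIntersection_eq_closeAll]
  conv_lhs => rw [← pvMap_getD_range (pvBuildSets selected_pairs)]
  rw [pvCloseAll_map _ _ List.nodup_range]
  rw [pvTurn_items _
    (fun c hc => pvIdxCloseAll_nodup _ hnd _ c hc)
    (pvIdxCloseAll_pairwise _ _)]
  have hB := pvOuter_sim (pvBuildSets selected_pairs) hnd
      (List.range (pvBuildSets selected_pairs).length)
      (List.replicate (pvBuildSets selected_pairs).length false) PySem.Dict.empty 0
      (by simp) List.pairwise_lt_range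
      (by rw [pvRem_replicate]; exact fun j hj => hj)
      (by intro j hj x hx; simp [PySem.Dict.contains_empty])
  rw [pvRem_replicate] at hB
  rw [hB]
  norm_num
  rfl

-- ===== VERDICT (by name: the statement is the Claim_ definition above) =====
theorem get_mapping_dict_spec : Claim_equal_get_mapping_dict := by
  intro sp _ _
  unfold Spec_get_mapping_dict
  exact get_mapping_dict_main sp
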